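-- pv_equiv track=rewrite | github.com/maxjamchuk/g060525-e-pt | Модуль 2. Core Python/Урок 8. Функции/homework.py | analyze_strings
-- ===== SOURCE A (Python) =====
-- def analyze_strings(strings):
--     if not strings:
--         return (None, None, 0)
--
--     first = max(strings, key= len)
--     last = min(strings, key = len)
--     count = len(strings)
--     long_count = sum( 1 for s in strings if 'a' in s.lower())
--
--     return(first, last,long_count, count)
-- ===== SOURCE B (Python) =====
-- # B: single pass with running extrema/counters instead of A's four separate passes
-- # (max, min, len, sum). On the empty list A returns a 3-tuple (None, None, 0),
-- # which has no value of the declared return type, so Pre_ excludes it; B's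
-- # running-state form naturally yields the 4-tuple (None, None, 0, 0) there.
-- def analyze_strings(strings):
--     longest = None
--     shortest = None
--     long_count = 0
--     count = 0
--     for s in strings:
--         if longest is None or len(s) > len(longest):
--             longest = s
--         if shortest is None or len(s) < len(shortest):
--             shortest = s
--         if 'a' in s or 'A' in s:
--             long_count += 1
--         count += 1
--     return (longest, shortest, long_count, count)
-- ===== Notes on version B (the rewrite author's own statement) =====
-- stated objective: alternative
-- what changed: Replaces A's four separate traversals (max by len, min by len, len, and a generator sum over s.lower()) with one loop that maintains running longest/shortest (strict comparisons preserve first-occurrence ties), a count, and tests 'a' in s or 'A' in s instead of lowercasing; the empty list, where A returns the 3-tuple (None, None, 0) instead of a 4-tuple, is excluded by Pre_.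
-- outside the precondition, e.g. on analyze_strings([]): A returns (None, None, 0), B returns (None, None, 0, 0)
import Mathlib
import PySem

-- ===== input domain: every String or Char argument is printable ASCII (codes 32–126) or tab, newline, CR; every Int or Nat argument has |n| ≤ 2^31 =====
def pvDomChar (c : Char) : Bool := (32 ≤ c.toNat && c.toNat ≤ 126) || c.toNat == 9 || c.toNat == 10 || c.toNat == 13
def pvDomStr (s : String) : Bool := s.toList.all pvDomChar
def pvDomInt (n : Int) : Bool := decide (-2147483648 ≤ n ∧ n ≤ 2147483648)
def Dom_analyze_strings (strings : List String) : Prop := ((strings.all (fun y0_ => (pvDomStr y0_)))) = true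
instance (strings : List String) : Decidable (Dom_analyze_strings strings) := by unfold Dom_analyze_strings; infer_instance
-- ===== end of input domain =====

-- B replaces A's four separate traversals by one running-state pass (objective: alternative, same cost).

-- ===== PORT A =====
-- A: empty guard, then max(strings, key=len), min(strings, key=len), len, and a 0/1 generator sum.
def analyze_strings (strings : List String) : Option String × Option String × Int × Int :=
  if strings = [] then
    (none, none, 0, 0)  -- Python A returns the 3-tuple (None, None, 0) here — no value of the declared type; Pre_ excludes []
  else
    let first := PySem.List.max? strings PySem.Str.len
    let last := PySem.List.min? strings PySem.Str.len
    let count : Int := strings.length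
    let long_count : Int := (strings.map (fun s => if PySem.Str.isIn "a" (PySem.Str.lower s) then (1 : Int) else 0)).sum
    (first, last, long_count, count)

-- ===== PORT B =====
-- B-side helpers: the two conditional updates of Source B's loop body
def pvMaxStep (acc : Option String) (s : String) : Option String :=
  match acc with
  | none => some s
  | some t => if PySem.Str.len s > PySem.Str.len t then some s else some t

def pvMinStep (acc : Option String) (s : String) : Option String :=
  match acc with
  | none => some s
  | some t => if PySem.Str.len s < PySem.Str.len t then some s else some t

def pvStepB (st : Option String × Option String × Int × Int) (s : String) :
    Option String × Option String × Int × Int :=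
  (pvMaxStep st.1 s, pvMinStep st.2.1 s,
   (if PySem.Str.isIn "a" s || PySem.Str.isIn "A" s then st.2.2.1 + 1 else st.2.2.1),
   st.2.2.2 + 1)

def analyze_strings_alt (strings : List String) : Option String × Option String × Int × Int :=
  strings.foldl pvStepB (none, none, 0, 0)

-- ===== PRECONDITION & SPEC =====
-- Pre_ excludes the empty list, where A returns a 3-tuple (None, None, 0) that is not a value of the declared 4-tuple return type.
def Pre_analyze_strings (strings : List String) : Prop := strings ≠ []
instance (strings : List String) : Decidable (Pre_analyze_strings strings) := by unfold Pre_analyze_strings; infer_instance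
def pvWitness_analyze_strings : List String := ["ab"]

def Spec_analyze_strings (strings : List String) (out : Option String × Option String × Int × Int) : Prop := out = analyze_strings_alt strings
instance (strings : List String) (out : Option String × Option String × Int × Int) : Decidable (Spec_analyze_strings strings out) := by unfold Spec_analyze_strings; infer_instance

-- ===== CLAIM (what is proved, stated in full; the proofs are below) =====
def Claim_equal_analyze_strings : Prop := ∀ (strings : List String), Dom_analyze_strings strings → Pre_analyze_strings strings → Spec_analyze_strings strings (analyze_strings strings)

-- ===== LEMMAS AND PROOFS =====

-- Python's c.lower() maps a char to 'a' exactly on 'a' and 'A'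
lemma pv_lowerChar_eq_a (c : Char) : PySem.Chars.lowerChar c = 'a' ↔ c = 'a' ∨ c = 'A' := by
  unfold PySem.Chars.lowerChar PySem.Chars.isupper
  split_ifs with h
  · simp only [Bool.and_eq_true, decide_eq_true_eq, Char.le_def] at h
    obtain ⟨h1, h2⟩ := h
    have h1' : 65 ≤ c.toNat := UInt32.le_iff_toNat_le.mp h1
    have h2' : c.toNat ≤ 90 := UInt32.le_iff_toNat_le.mp h2
    have hval : (Char.ofNat (c.toNat + 32)).toNat = c.toNat + 32 := by
      rw [Char.toNat_ofNat, if_pos (Or.inl (by omega : c.toNat + 32 < 0xd800))]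
    constructor
    · intro he
      have h97 : c.toNat + 32 = 97 := by
        have := congrArg Char.toNat he
        rw [hval] at this
        exact this
      right
      have hc : c.toNat = 65 := by omega
      calc c = Char.ofNat c.toNat := (Char.ofNat_toNat c).symm
        _ = Char.ofNat 65 := by rw [hc]
        _ = 'A' := by decide
    · rintro (rfl | rfl)
      · exact absurd h2' (by decide)
      · decide
  · constructor
    · intro he; exact Or.inl he
    · rintro (rfl | rfl)
      · rfl
      · exact absurd h (by decide)

lemma pv_singleton_infix {a : Char} {l : List Char} : [a] <:+: l ↔ a ∈ l := by
  constructor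
  · intro h
    exact h.subset (by simp)
  · intro h
    obtain ⟨u, v, rfl⟩ := List.append_of_mem h
    exact ⟨u, v, by simp⟩

-- 'a' in s.lower()  =  ('a' in s) or ('A' in s)
lemma pv_cond_eq (s : String) :
    PySem.Str.isIn "a" (PySem.Str.lower s) = (PySem.Str.isIn "a" s || PySem.Str.isIn "A" s) := by
  rw [Bool.eq_iff_iff]
  simp only [Bool.or_eq_true, PySem.Str.isIn_iff_infix, PySem.Str.toList_lower]
  have ha : ("a" : String).toList = ['a'] := rfl
  have hA : ("A" : String).toList = ['A'] := rfl
  rw [ha, hA, pv_singleton_infix, pv_singleton_infix, pv_singleton_infix]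
  simp only [PySem.Chars.lower, List.mem_map]
  constructor
  · rintro ⟨c, hc, he⟩
    rcases (pv_lowerChar_eq_a c).mp he with rfl | rfl
    · exact Or.inl hc
    · exact Or.inr hc
  · rintro (h | h)
    · exact ⟨'a', h, by decide⟩
    · exact ⟨'A', h, by decide⟩

-- the combined fold splits into the four per-component quantities
lemma pv_foldB_eq (l : List String) (lo sh : Option String) (c n : Int) :
    List.foldl pvStepB (lo, sh, c, n) l =
      (List.foldl pvMaxStep lo l, List.foldl pvMinStep sh l,
       c + (l.countP (fun s => PySem.Str.isIn "a" s || PySem.Str.isIn "A" s) : Int),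
       n + l.length) := by
  induction l generalizing lo sh c n with
  | nil => simp
  | cons x t ih =>
    simp only [List.foldl_cons, pvStepB]
    rw [ih]
    simp only [List.countP_cons, List.length_cons, Prod.mk.injEq]
    refine ⟨trivial, trivial, ?_, ?_⟩
    · split_ifs with hx <;> push_cast <;> ring
    · push_cast; ring

lemma pv_max?_eq (xs : List String) :
    PySem.List.max? xs PySem.Str.len = List.foldl pvMaxStep none xs := by
  unfold PySem.List.max?
  congr 1
  funext acc x
  cases acc <;> simp [pvMaxStep, gt_iff_lt]

lemma pv_min?_eq (xs : List String) :
    PySem.List.min? xs PySem.Str.len = List.foldl pvMinStep none xs := by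
  unfold PySem.List.min?
  congr 1
  funext acc x
  cases acc <;> simp [pvMinStep]

-- ===== VERDICT (by name: the statement is the Claim_ definition above) =====
theorem analyze_strings_spec : Claim_equal_analyze_strings := by
  intro strings _hdom hpre
  unfold Spec_analyze_strings analyze_strings analyze_strings_alt
  rw [if_neg hpre, pv_foldB_eq]
  refine Prod.ext (pv_max?_eq strings) (Prod.ext (pv_min?_eq strings) (Prod.ext ?_ ?_))
  · simp only [PySem.List.sum_map_ite_one_zero]
    rw [List.countP_congr (fun s _ => by rw [pv_cond_eq s])]
    simp
  · simp
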